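-- pv_equiv track=rewrite | github.com/trowar/vpn-manager | scripts/openvpn_session_guard.py | parse_openvpn_active_identities
-- ===== SOURCE A (Python) =====
-- def parse_openvpn_active_identities(raw_text: str) -> list[str]:
--     identities: list[str] = []
--     seen: set[str] = set()
--     in_client_section = False
--     for raw_line in (raw_text or "").splitlines():
--         line = (raw_line or "").strip()
--         if not line:
--             continue
--         if line.startswith("CLIENT_LIST,"):
--             parts = line.split(",")
--             if len(parts) > 1:
--                 identity = (parts[1] or "").strip()
--                 if identity and identity not in seen and identity.lower() != "common name":
--                     seen.add(identity)
--                     identities.append(identity)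
--             continue
--         if line.startswith("Common Name,"):
--             in_client_section = True
--             continue
--         if line.startswith("ROUTING TABLE") or line.startswith("GLOBAL STATS"):
--             in_client_section = False
--             continue
--         if in_client_section and "," in line:
--             identity = (line.split(",", 1)[0] or "").strip()
--             if identity and identity not in seen and identity.lower() != "common name":
--                 seen.add(identity)
--                 identities.append(identity)
--     return identities
-- ===== SOURCE B (Python) =====
-- def parse_openvpn_active_identities(raw_text: str) -> list[str]:
--     # Staged pipeline instead of a fused stateful loop:
--     # 1) normalise lines, 2) precompute the section flag per line,
--     # 3) collect raw candidates by position, 4) filter + ordered dedup.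
--     lines = [raw.strip() for raw in (raw_text or "").splitlines()]
--     lines = [l for l in lines if l]
--
--     # pass 1: section flag in effect *at* each line (state before the line applies)
--     flags = []
--     f = False
--     for l in lines:
--         flags.append(f)
--         if l.startswith("Common Name,"):
--             f = True
--         elif l.startswith("ROUTING TABLE") or l.startswith("GLOBAL STATS"):
--             f = False
--
--     # pass 2: raw candidate per line (no filtering, no dedup)
--     cands = []
--     for l, f in zip(lines, flags):
--         if l.startswith("CLIENT_LIST,"):
--             parts = l.split(",")
--             if len(parts) > 1:
--                 cands.append(parts[1].strip())
--         elif (not (l.startswith("Common Name,")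
--                    or l.startswith("ROUTING TABLE")
--                    or l.startswith("GLOBAL STATS"))
--               and f and "," in l):
--             cands.append(l.split(",", 1)[0].strip())
--
--     # pass 3: drop empty / header names, dedup keeping first occurrences
--     return list(dict.fromkeys(c for c in cands if c and c.lower() != "common name"))
-- ===== Notes on version B (the rewrite author's own statement) =====
-- stated objective: alternative
-- what changed: A's single fused state machine (flag + inline seen-set dedup while scanning) is replaced by a staged pipeline: normalise lines, precompute the per-line section flag in a separate pass, collect raw candidates positionally via zip, then filter and dedup at the end with dict.fromkeys.
import Mathlib
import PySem

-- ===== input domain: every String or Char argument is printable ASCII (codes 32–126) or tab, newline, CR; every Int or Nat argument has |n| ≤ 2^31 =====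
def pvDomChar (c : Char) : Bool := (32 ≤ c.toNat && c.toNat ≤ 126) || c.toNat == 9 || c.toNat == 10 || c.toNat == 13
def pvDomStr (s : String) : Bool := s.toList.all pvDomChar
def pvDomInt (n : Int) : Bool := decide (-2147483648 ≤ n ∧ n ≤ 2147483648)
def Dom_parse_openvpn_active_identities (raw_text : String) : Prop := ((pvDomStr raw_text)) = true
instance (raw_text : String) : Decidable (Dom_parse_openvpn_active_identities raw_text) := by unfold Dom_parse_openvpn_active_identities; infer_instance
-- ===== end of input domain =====

-- B replaces A's fused state machine (flag + inline seen-set while scanning) by a staged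
-- pipeline: normalise lines, precompute the per-line section flag, collect raw candidates
-- positionally, then filter and dedup at the end. Same result, different decomposition.

-- ===== PORT A =====
-- A's repeated filter-and-append block (the 'if identity and identity not in seen and …' body)
def pvEmitA (st : List String × PySem.Set String × Bool) (identity : String) :
    List String × PySem.Set String × Bool :=
  let (identities, seen, in_client_section) := st
  if identity ≠ "" ∧ ¬ identity ∈ seen ∧ PySem.Str.lower identity ≠ "common name" then
    (identities ++ [identity], PySem.Set.add seen identity, in_client_section)
  else (identities, seen, in_client_section)

-- A's loop body: state = (identities, seen, in_client_section)
def pvStepA (st : List String × PySem.Set String × Bool) (raw_line : String) :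
    List String × PySem.Set String × Bool :=
  let (identities, seen, in_client_section) := st
  let line := PySem.Str.strip raw_line
  if line = "" then (identities, seen, in_client_section)
  else if PySem.Str.startswith line "CLIENT_LIST," then
    let parts := (PySem.Str.split? line ",").getD []
    if parts.length > 1 then
      pvEmitA (identities, seen, in_client_section) (PySem.Str.strip (PySem.List.pyGetD parts 1 ""))
    else (identities, seen, in_client_section)
  else if PySem.Str.startswith line "Common Name," then (identities, seen, true)
  else if PySem.Str.startswith line "ROUTING TABLE" ∨ PySem.Str.startswith line "GLOBAL STATS" then
    (identities, seen, false)
  else if in_client_section ∧ PySem.Str.isIn "," line then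
    pvEmitA (identities, seen, in_client_section)
      (PySem.Str.strip (PySem.List.pyGetD ((PySem.Str.splitMax? line "," 1).getD []) 0 ""))
  else (identities, seen, in_client_section)

def parse_openvpn_active_identities (raw_text : String) : List String :=
  ((PySem.Str.splitlines raw_text).foldl pvStepA ([], PySem.Set.empty, false)).1

-- ===== PORT B =====
-- the genexp filter 'c and c.lower() != "common name"'
def pvKeep (c : String) : Bool := decide (c ≠ "" ∧ PySem.Str.lower c ≠ "common name")

-- pass 1 body: state = (flags so far, flag in effect)
def pvFlagStep (st : List Bool × Bool) (l : String) : List Bool × Bool :=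
  let flags := st.1 ++ [st.2]
  if PySem.Str.startswith l "Common Name," then (flags, true)
  else if PySem.Str.startswith l "ROUTING TABLE" ∨ PySem.Str.startswith l "GLOBAL STATS" then
    (flags, false)
  else (flags, st.2)

-- pass 2 body: one zipped (line, flag) pair → raw candidates appended (no filtering, no dedup)
def pvCandStep (acc : List String) (lf : String × Bool) : List String :=
  if PySem.Str.startswith lf.1 "CLIENT_LIST," then
    let parts := (PySem.Str.split? lf.1 ",").getD []
    if parts.length > 1 then acc ++ [PySem.Str.strip (PySem.List.pyGetD parts 1 "")] else acc
  else if ¬ (PySem.Str.startswith lf.1 "Common Name," ∨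
             PySem.Str.startswith lf.1 "ROUTING TABLE" ∨
             PySem.Str.startswith lf.1 "GLOBAL STATS") ∧ lf.2 = true ∧ PySem.Str.isIn "," lf.1 then
    acc ++ [PySem.Str.strip (PySem.List.pyGetD ((PySem.Str.splitMax? lf.1 "," 1).getD []) 0 "")]
  else acc

def parse_openvpn_active_identities_alt (raw_text : String) : List String :=
  let lines := ((PySem.Str.splitlines raw_text).map PySem.Str.strip).filter (fun l => decide (l ≠ ""))
  let flags := (lines.foldl pvFlagStep ([], false)).1
  let cands := (lines.zip flags).foldl pvCandStep []
  PySem.List.dedup (cands.filter pvKeep)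

-- ===== PRECONDITION & SPEC =====
def Spec_parse_openvpn_active_identities (raw_text : String) (out : List String) : Prop := out = parse_openvpn_active_identities_alt raw_text
instance (raw_text : String) (out : List String) : Decidable (Spec_parse_openvpn_active_identities raw_text out) := by unfold Spec_parse_openvpn_active_identities; infer_instance

-- ===== CLAIM (what is proved, stated in full; the proofs are below) =====
def Claim_equal_parse_openvpn_active_identities : Prop := ∀ (raw_text : String), Dom_parse_openvpn_active_identities raw_text → Spec_parse_openvpn_active_identities raw_text (parse_openvpn_active_identities raw_text)

-- ===== LEMMAS AND PROOFS =====

-- proof-side cons-shaped emission of one kept candidate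
def pvEmitC (rest : List String) (identity : String) : List String :=
  if identity ≠ "" ∧ PySem.Str.lower identity ≠ "common name" then identity :: rest else rest

-- the kept candidates A's scan would append, from a list of raw lines, recursively
def pvCands : List String → Bool → List String
  | [], _ => []
  | raw_line :: ls, flag =>
    let line := PySem.Str.strip raw_line
    if line = "" then pvCands ls flag
    else if PySem.Str.startswith line "CLIENT_LIST," then
      let parts := (PySem.Str.split? line ",").getD []
      if parts.length > 1 then
        pvEmitC (pvCands ls flag) (PySem.Str.strip (PySem.List.pyGetD parts 1 ""))
      else pvCands ls flag
    else if PySem.Str.startswith line "Common Name," then pvCands ls true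
    else if PySem.Str.startswith line "ROUTING TABLE" ∨ PySem.Str.startswith line "GLOBAL STATS" then
      pvCands ls false
    else if flag ∧ PySem.Str.isIn "," line then
      pvEmitC (pvCands ls flag) (PySem.Str.strip (PySem.List.pyGetD ((PySem.Str.splitMax? line "," 1).getD []) 0 ""))
    else pvCands ls flag

-- the same, on already stripped non-empty lines
def pvCandsClean : List String → Bool → List String
  | [], _ => []
  | l :: ls, flag =>
    if PySem.Str.startswith l "CLIENT_LIST," then
      let parts := (PySem.Str.split? l ",").getD []
      if parts.length > 1 then
        pvEmitC (pvCandsClean ls flag) (PySem.Str.strip (PySem.List.pyGetD parts 1 ""))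
      else pvCandsClean ls flag
    else if PySem.Str.startswith l "Common Name," then pvCandsClean ls true
    else if PySem.Str.startswith l "ROUTING TABLE" ∨ PySem.Str.startswith l "GLOBAL STATS" then
      pvCandsClean ls false
    else if flag ∧ PySem.Str.isIn "," l then
      pvEmitC (pvCandsClean ls flag) (PySem.Str.strip (PySem.List.pyGetD ((PySem.Str.splitMax? l "," 1).getD []) 0 ""))
    else pvCandsClean ls flag

-- B's pass-1 flag transition and the per-line flag list
def pvNextFlag (f : Bool) (l : String) : Bool :=
  if PySem.Str.startswith l "Common Name," then true
  else if PySem.Str.startswith l "ROUTING TABLE" ∨ PySem.Str.startswith l "GLOBAL STATS" then false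
  else f

def pvFlagsFrom (f : Bool) : List String → List Bool
  | [] => []
  | l :: ls => f :: pvFlagsFrom (pvNextFlag f l) ls

-- B's pass 2 as a recursion
def pvPass2 : List (String × Bool) → List String
  | [] => []
  | lf :: rest =>
    if PySem.Str.startswith lf.1 "CLIENT_LIST," then
      let parts := (PySem.Str.split? lf.1 ",").getD []
      if parts.length > 1 then PySem.Str.strip (PySem.List.pyGetD parts 1 "") :: pvPass2 rest
      else pvPass2 rest
    else if ¬ (PySem.Str.startswith lf.1 "Common Name," ∨
               PySem.Str.startswith lf.1 "ROUTING TABLE" ∨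
               PySem.Str.startswith lf.1 "GLOBAL STATS") ∧ lf.2 = true ∧ PySem.Str.isIn "," lf.1 then
      PySem.Str.strip (PySem.List.pyGetD ((PySem.Str.splitMax? lf.1 "," 1).getD []) 0 "") :: pvPass2 rest
    else pvPass2 rest

theorem pvStartswith_iff (s p : String) :
    PySem.Str.startswith s p = true ↔ p.toList <+: s.toList := by
  simp [PySem.Chars.startswith_iff]

-- two non-comparable prefixes cannot both start the same string
theorem pvExcl (s p q : String) (h : PySem.Str.startswith s p = true)
    (h1 : ¬ p.toList <+: q.toList) (h2 : ¬ q.toList <+: p.toList) :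
    PySem.Str.startswith s q = false := by
  rw [← Bool.not_eq_true]
  intro hq
  rcases List.prefix_or_prefix_of_prefix ((pvStartswith_iff s q).mp hq)
      ((pvStartswith_iff s p).mp h) with h' | h'
  · exact h2 h'
  · exact h1 h'

theorem pvClientNotMarker (l : String) (h : PySem.Str.startswith l "CLIENT_LIST," = true) :
    PySem.Str.startswith l "Common Name," = false ∧
    PySem.Str.startswith l "ROUTING TABLE" = false ∧
    PySem.Str.startswith l "GLOBAL STATS" = false :=
  ⟨pvExcl l _ _ h (by decide) (by decide),
   pvExcl l _ _ h (by decide) (by decide),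
   pvExcl l _ _ h (by decide) (by decide)⟩

theorem pvFilter_cons_emit (id : String) (xs : List String) :
    List.filter pvKeep (id :: xs) = pvEmitC (List.filter pvKeep xs) id := by
  by_cases h : id ≠ "" ∧ PySem.Str.lower id ≠ "common name" <;>
    simp [pvEmitC, pvKeep, h]

-- pass 1 computes pvFlagsFrom
theorem pvFlags_eq (ls : List String) : ∀ (acc : List Bool) (f : Bool),
    ls.foldl pvFlagStep (acc, f) = (acc ++ pvFlagsFrom f ls, ls.foldl pvNextFlag f) := by
  induction ls with
  | nil => intro acc f; simp [pvFlagsFrom]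
  | cons l ls ih =>
    intro acc f
    have hstep : pvFlagStep (acc, f) l = (acc ++ [f], pvNextFlag f l) := by
      simp only [pvFlagStep, pvNextFlag]; split_ifs <;> rfl
    simp only [List.foldl_cons, hstep, ih, pvFlagsFrom, List.append_assoc, List.singleton_append]

-- pass 2's foldl is pvPass2
theorem pvPass2_eq (zs : List (String × Bool)) : ∀ (acc : List String),
    zs.foldl pvCandStep acc = acc ++ pvPass2 zs := by
  induction zs with
  | nil => intro acc; simp [pvPass2]
  | cons z zs ih =>
    intro acc
    simp only [List.foldl_cons, pvCandStep, pvPass2]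
    split_ifs <;> simp [ih]

-- filtering B's raw candidates gives the kept candidates
theorem pvPass2_filter (ls : List String) : ∀ (f : Bool),
    List.filter pvKeep (pvPass2 (ls.zip (pvFlagsFrom f ls))) = pvCandsClean ls f := by
  induction ls with
  | nil => intro f; simp [pvFlagsFrom, pvPass2, pvCandsClean]
  | cons l ls ih =>
    intro f
    simp only [pvFlagsFrom, List.zip_cons_cons]
    cases hCL : PySem.Str.startswith l "CLIENT_LIST," with
    | true =>
      obtain ⟨hCN, hRT, hGS⟩ := pvClientNotMarker l hCL
      simp only [pvPass2, pvCandsClean, pvNextFlag, hCL, hCN, hRT, hGS, Bool.false_eq_true,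
        or_self, not_false_iff, if_true, if_false]
      by_cases hp : ((PySem.Str.split? l ",").getD []).length > 1
      · rw [if_pos hp, if_pos hp, pvFilter_cons_emit, ih]
      · rw [if_neg hp, if_neg hp]; exact ih f
    | false =>
      cases hCN : PySem.Str.startswith l "Common Name," with
      | true =>
        simp only [pvPass2, pvCandsClean, pvNextFlag, hCL, hCN, Bool.false_eq_true,
          true_or, not_true, false_and, if_false, if_pos trivial]
        exact ih true
      | false =>
        simp only [pvPass2, pvCandsClean, pvNextFlag, hCL, hCN, Bool.false_eq_true,
          false_or, if_false]
        by_cases hM : PySem.Str.startswith l "ROUTING TABLE" = true ∨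
            PySem.Str.startswith l "GLOBAL STATS" = true
        · rw [if_neg (fun h => h.1 hM)]
          simp only [if_pos hM]
          exact ih false
        · simp only [if_neg hM]
          by_cases h4 : f = true ∧ PySem.Str.isIn "," l = true
          · rw [if_pos (⟨hM, h4⟩ : ¬ _ ∧ _), if_pos h4, pvFilter_cons_emit, ih]
          · rw [if_neg (fun h => h4 h.2), if_neg h4]
            exact ih f

-- A's raw scan over raw lines equals the clean scan over stripped non-empty lines
theorem pvCands_clean (ls : List String) : ∀ (f : Bool),
    pvCands ls f = pvCandsClean ((ls.map PySem.Str.strip).filter (fun l => decide (l ≠ ""))) f := by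
  induction ls with
  | nil => intro f; simp [pvCands, pvCandsClean]
  | cons l ls ih =>
    intro f
    by_cases hs : PySem.Str.strip l = ""
    · simp only [pvCands, hs, List.map_cons, List.filter_cons]
      simp [ih]
    · simp only [pvCands, List.map_cons, List.filter_cons]
      rw [if_neg hs]
      simp only [hs, decide_not, if_true, decide_false, Bool.not_false, pvCandsClean]
      split_ifs <;> simp [ih]

-- A's fold with the inline seen-set equals folding Set.add over the kept candidates
theorem pvEmit_key (ls : List String)
    (ih : ∀ (ids : List String) (seen : PySem.Set String) (flag : Bool),
      (∀ x, x ∈ seen ↔ x ∈ ids) →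
      (ls.foldl pvStepA (ids, seen, flag)).1 = (pvCands ls flag).foldl PySem.Set.add ids)
    (ids : List String) (seen : PySem.Set String) (flag : Bool) (id : String)
    (hinv : ∀ x, x ∈ seen ↔ x ∈ ids) :
    (ls.foldl pvStepA (pvEmitA (ids, seen, flag) id)).1
      = (pvEmitC (pvCands ls flag) id).foldl PySem.Set.add ids := by
  simp only [pvEmitA, pvEmitC]
  by_cases hk : id ≠ "" ∧ PySem.Str.lower id ≠ "common name"
  · rw [if_pos hk]
    simp only [List.foldl_cons]
    by_cases hs : id ∈ seen
    · rw [if_neg (by intro h; exact h.2.1 hs)]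
      have hadd : PySem.Set.add ids id = ids := by
        rw [PySem.Set.add, if_pos ((PySem.Set.contains_iff ids id).mpr ((hinv id).mp hs))]
      rw [hadd]
      exact ih _ _ _ hinv
    · rw [if_pos ⟨hk.1, hs, hk.2⟩]
      have hadd : PySem.Set.add ids id = ids ++ [id] := by
        rw [PySem.Set.add, if_neg]
        simp only [PySem.Set.contains_iff]
        exact fun h => hs ((hinv id).mpr h)
      rw [hadd]
      refine ih _ _ _ ?_
      intro x
      rw [PySem.Set.mem_add]
      simp [hinv x]
  · rw [if_neg hk, if_neg (by intro h; exact hk ⟨h.1, h.2.2⟩)]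
    exact ih _ _ _ hinv

theorem pvFoldA_eq (ls : List String) : ∀ (ids : List String) (seen : PySem.Set String) (flag : Bool),
    (∀ x, x ∈ seen ↔ x ∈ ids) →
    (ls.foldl pvStepA (ids, seen, flag)).1 = (pvCands ls flag).foldl PySem.Set.add ids := by
  induction ls with
  | nil => intro ids seen flag _; simp [pvCands]
  | cons l ls ih =>
    intro ids seen flag hinv
    simp only [List.foldl_cons, pvStepA, pvCands]
    split_ifs with h1 h2 h3 h4 h5 h6
    · exact ih _ _ _ hinv
    · exact pvEmit_key ls ih _ _ _ _ hinv
    · exact ih _ _ _ hinv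
    · exact ih _ _ _ hinv
    · exact ih _ _ _ hinv
    · exact pvEmit_key ls ih _ _ _ _ hinv
    · exact ih _ _ _ hinv

-- ===== VERDICT (by name: the statement is the Claim_ definition above) =====
theorem parse_openvpn_active_identities_spec : Claim_equal_parse_openvpn_active_identities := by
  intro raw_text _
  unfold Spec_parse_openvpn_active_identities parse_openvpn_active_identities
    parse_openvpn_active_identities_alt
  rw [pvFoldA_eq _ [] PySem.Set.empty false (by simp [PySem.Set.empty])]
  simp only [pvFlags_eq, List.nil_append, pvPass2_eq, pvPass2_filter, ← pvCands_clean]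
  simp [PySem.List.dedup_eq_ofList, PySem.Set.ofList_eq_foldl]
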